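-- pv_equiv track=rewrite | github.com/4geru/wbc-2026-data | scripts/scraping_wbc2026.py | parse_runners
-- ===== SOURCE A (Python) =====
-- def parse_runners(runners):
--     r1, r2, r3 = False, False, False
--     for r in runners:
--         base = r.get("movement", {}).get("originBase") or r.get("movement", {}).get("start")
--         if base == "1B":
--             r1 = True
--         elif base == "2B":
--             r2 = True
--         elif base == "3B":
--             r3 = True
--     return int(r1), int(r2), int(r3)
-- ===== SOURCE B (Python) =====
-- def parse_runners(runners):
--     def base(r):
--         m = r.get("movement", {})
--         return m.get("originBase") or m.get("start")
--
--     def occupied(b):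
--         return any(base(r) == b for r in runners)
--
--     return int(occupied("1B")), int(occupied("2B")), int(occupied("3B"))
-- ===== Notes on version B (the rewrite author's own statement) =====
-- stated objective: simpler
-- what changed: Replaces the single accumulator pass with three boolean flags and an if/elif chain by three independent short-circuiting existence scans (any(...) per base), so no per-runner branching or mutable state remains.
import Mathlib
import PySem

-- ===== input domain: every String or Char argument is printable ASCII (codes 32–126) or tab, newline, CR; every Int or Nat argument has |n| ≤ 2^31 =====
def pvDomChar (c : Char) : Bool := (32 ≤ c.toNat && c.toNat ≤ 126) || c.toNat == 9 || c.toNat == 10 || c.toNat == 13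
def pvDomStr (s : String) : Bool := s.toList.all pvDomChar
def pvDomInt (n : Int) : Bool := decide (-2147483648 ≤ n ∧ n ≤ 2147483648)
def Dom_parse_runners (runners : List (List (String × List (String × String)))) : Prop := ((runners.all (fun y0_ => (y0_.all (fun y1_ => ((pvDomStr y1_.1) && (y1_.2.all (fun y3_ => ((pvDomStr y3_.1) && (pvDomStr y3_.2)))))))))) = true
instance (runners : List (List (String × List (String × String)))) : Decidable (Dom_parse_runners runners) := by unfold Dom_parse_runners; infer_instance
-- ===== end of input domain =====

-- B rewrite: the single accumulator pass with three flags and an if/elif chain is replaced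
-- by three independent short-circuiting existence scans, one per base (objective: simpler).

-- d.get(k) on a Python dict modelled as an assoc list: first match.
def pvGet? {a : Type} (d : List (String × a)) (k : String) : Option a :=
  (d.find? (fun p => p.1 = k)).map (fun p => p.2)

-- Python's `x or y` on Optional[str]: none and "" are falsy.
def pvOrStr (a b : Option String) : Option String :=
  match a with
  | some s => if s = "" then b else some s
  | none => b

-- base = r.get("movement", {}).get("originBase") or r.get("movement", {}).get("start")
-- (B's helper computes the same with one lookup of "movement"; the first match is the same value)
def pvBase (r : List (String × List (String × String))) : Option String :=
  pvOrStr (pvGet? ((pvGet? r "movement").getD []) "originBase")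
          (pvGet? ((pvGet? r "movement").getD []) "start")

-- ===== PORT A =====
def parse_runners (runners : List (List (String × List (String × String)))) : Int × Int × Int :=
  let st := runners.foldl (fun (acc : Bool × Bool × Bool) r =>
    let base := pvBase r
    if base = some "1B" then (true, acc.2.1, acc.2.2)
    else if base = some "2B" then (acc.1, true, acc.2.2)
    else if base = some "3B" then (acc.1, acc.2.1, true)
    else acc) (false, false, false)
  ((if st.1 then 1 else 0), (if st.2.1 then 1 else 0), (if st.2.2 then 1 else 0))

-- ===== PORT B =====
-- occupied(b) = any(base(r) == b for r in runners): an independent short-circuit scan per base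
def pvOccupied (runners : List (List (String × List (String × String)))) (b : String) : Bool :=
  runners.any (fun r => pvBase r = some b)

def parse_runners_alt (runners : List (List (String × List (String × String)))) : Int × Int × Int :=
  ((if pvOccupied runners "1B" then 1 else 0),
   (if pvOccupied runners "2B" then 1 else 0),
   (if pvOccupied runners "3B" then 1 else 0))

-- ===== PRECONDITION & SPEC =====
def Spec_parse_runners (runners : List (List (String × List (String × String)))) (out : Int × Int × Int) : Prop := out = parse_runners_alt runners
instance (runners : List (List (String × List (String × String)))) (out : Int × Int × Int) : Decidable (Spec_parse_runners runners out) := by unfold Spec_parse_runners; infer_instance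

-- ===== CLAIM (what is proved, stated in full; the proofs are below) =====
def Claim_equal_parse_runners : Prop := ∀ (runners : List (List (String × List (String × String)))), Dom_parse_runners runners → Spec_parse_runners runners (parse_runners runners)

-- ===== LEMMAS AND PROOFS =====

-- A's fold: each flag is exactly "some runner's base is 1B/2B/3B", or-ed with the seed.
theorem parse_runners_fold_char (runners : List (List (String × List (String × String))))
    (acc : Bool × Bool × Bool) :
    runners.foldl (fun (acc : Bool × Bool × Bool) r =>
      let base := pvBase r
      if base = some "1B" then (true, acc.2.1, acc.2.2)
      else if base = some "2B" then (acc.1, true, acc.2.2)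
      else if base = some "3B" then (acc.1, acc.2.1, true)
      else acc) acc
    = (acc.1 || runners.any (fun r => pvBase r = some "1B"),
       acc.2.1 || runners.any (fun r => pvBase r = some "2B"),
       acc.2.2 || runners.any (fun r => pvBase r = some "3B")) := by
  induction runners generalizing acc with
  | nil => simp
  | cons r rs ih =>
    simp only [List.foldl_cons, List.any_cons]
    rw [ih]
    by_cases h1 : pvBase r = some "1B" <;>
      by_cases h2 : pvBase r = some "2B" <;>
        by_cases h3 : pvBase r = some "3B" <;>
          simp_all

-- ===== VERDICT (by name: the statement is the Claim_ definition above) =====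
theorem parse_runners_spec : Claim_equal_parse_runners := by
  intro runners _
  unfold Spec_parse_runners parse_runners parse_runners_alt pvOccupied
  rw [parse_runners_fold_char]
  simp only [Bool.false_or]
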